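-- pv_equiv track=rewrite | github.com/Pandaemonium/CausalOctonionGraph | calc/xor_observables.py | decode_base8_int
-- ===== SOURCE A (Python) =====
-- def decode_base8_int(value: str) -> int:
--     """
--     Decode signed base-8 string to integer.
--     """
--     if not isinstance(value, str):
--         raise TypeError("value must be a str")
--     if value == "":
--         raise ValueError("empty base8 string")
--     sign = -1 if value.startswith("-") else 1
--     raw = value[1:] if sign < 0 else value
--     if raw == "":
--         raise ValueError("invalid base8 string")
--     if any(ch not in "01234567" for ch in raw):
--         raise ValueError(f"invalid base8 digits: {value}")
--     return sign * int(raw, 8)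
-- ===== SOURCE B (Python) =====
-- def decode_base8_int(value: str) -> int:
--     """
--     Decode signed base-8 string to integer.
--     """
--     if not isinstance(value, str):
--         raise TypeError("value must be a str")
--     if value == "":
--         raise ValueError("empty base8 string")
--     sign = -1 if value.startswith("-") else 1
--     raw = value[1:] if sign < 0 else value
--     if raw == "":
--         raise ValueError("invalid base8 string")
--     acc = 0
--     for ch in raw:
--         if not ('0' <= ch <= '7'):
--             raise ValueError(f"invalid base8 digits: {value}")
--         acc = acc * 8 + (ord(ch) - 48)
--     return sign * acc
-- ===== Notes on version B (the rewrite author's own statement) =====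
-- stated objective: alternative
-- what changed: Replaces the separate any(...) validation pass plus the library parse int(raw, 8) with a single manual Horner loop that validates each character by range comparison and accumulates acc = acc*8 + (ord(ch)-48) in the same pass.
import Mathlib
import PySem

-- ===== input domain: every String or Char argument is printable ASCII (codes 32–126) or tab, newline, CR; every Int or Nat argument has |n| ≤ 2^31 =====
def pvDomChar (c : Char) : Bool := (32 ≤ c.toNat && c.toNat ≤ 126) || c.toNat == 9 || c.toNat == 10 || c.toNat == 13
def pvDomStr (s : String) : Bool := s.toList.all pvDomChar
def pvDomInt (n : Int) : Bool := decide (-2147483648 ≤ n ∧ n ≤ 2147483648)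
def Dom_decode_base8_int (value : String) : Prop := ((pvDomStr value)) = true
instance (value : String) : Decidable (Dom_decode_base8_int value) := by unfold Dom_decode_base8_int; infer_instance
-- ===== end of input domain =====

-- B fuses A's separate any(...) digit-validation pass and int(raw, 8) library parse into one
-- manual Horner loop (validate each char by range comparison, acc = acc*8 + (ord-48)); objective: alternative, same cost.

-- ===== PORT A =====
-- A raises on empty input, "-" alone, or any non-octal-digit char; Pre_ excludes exactly those,
-- so the port returns an arbitrary 0 on them (outside the claim).
-- int(raw, 8) ported by hand as a left fold acc*8 + digit over the chars; exact on Pre_ (raw is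
-- nonempty and all chars are '0'..'7', so no sign/underscore/whitespace handling of int() is reachable).
def decode_base8_int (value : String) : Int :=
  if value = "" then 0
  else
    let sign : Int := if PySem.Str.startswith value "-" then -1 else 1
    let raw : List Char := if sign < 0 then value.toList.drop 1 else value.toList
    if raw = [] then 0
    else if raw.any (fun ch => !(("01234567" : String).toList.contains ch)) then 0
    else sign * raw.foldl (fun acc ch => acc * 8 + ((ch.toNat : Int) - 48)) 0

-- ===== PORT B =====
-- single pass: validate-and-accumulate; none = the ValueError for an invalid digit
def pvB8Loop : List Char → Int → Option Int
  | [], acc => some acc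
  | ch :: cs, acc =>
    if '0' ≤ ch ∧ ch ≤ '7' then pvB8Loop cs (acc * 8 + ((ch.toNat : Int) - 48))
    else none

def decode_base8_int_alt (value : String) : Int :=
  if value = "" then 0
  else
    let sign : Int := if PySem.Str.startswith value "-" then -1 else 1
    let raw : List Char := if sign < 0 then value.toList.drop 1 else value.toList
    if raw = [] then 0
    else
      match pvB8Loop raw 0 with
      | some acc => sign * acc
      | none => 0

-- ===== PRECONDITION & SPEC =====
-- Pre_ excludes exactly the inputs on which A raises ValueError: the empty string, a bare "-",
-- and any string whose digit part contains a char outside '0'..'7'.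
def Pre_decode_base8_int (value : String) : Prop :=
  value ≠ "" ∧
  (let raw : List Char := if PySem.Str.startswith value "-" then value.toList.drop 1 else value.toList
   raw ≠ [] ∧ raw.all (fun c => ("01234567" : String).toList.contains c) = true)
instance (value : String) : Decidable (Pre_decode_base8_int value) := by
  unfold Pre_decode_base8_int; infer_instance
def pvWitness_decode_base8_int : String := "-017"
def Spec_decode_base8_int (value : String) (out : Int) : Prop := out = decode_base8_int_alt value
instance (value : String) (out : Int) : Decidable (Spec_decode_base8_int value out) := by unfold Spec_decode_base8_int; infer_instance

-- ===== CLAIM (what is proved, stated in full; the proofs are below) =====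
def Claim_equal_decode_base8_int : Prop := ∀ (value : String), Dom_decode_base8_int value → Pre_decode_base8_int value → Spec_decode_base8_int value (decode_base8_int value)

-- ===== LEMMAS AND PROOFS =====

-- a char of "01234567" passes B's range test and B's loop computes A's fold
theorem pvB8Loop_of_valid (l : List Char) (acc : Int)
    (h : ∀ c ∈ l, c ∈ ("01234567" : String).toList) :
    pvB8Loop l acc = some (l.foldl (fun acc ch => acc * 8 + ((ch.toNat : Int) - 48)) acc) := by
  induction l generalizing acc with
  | nil => rfl
  | cons c cs ih =>
    have hc : c ∈ ("01234567" : String).toList := h c (List.mem_cons_self ..)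
    have hrange : '0' ≤ c ∧ c ≤ '7' := by
      simp only [show ("01234567" : String).toList =
        ['0','1','2','3','4','5','6','7'] from rfl, List.mem_cons, List.not_mem_nil, or_false] at hc
      rcases hc with h|h|h|h|h|h|h|h <;> subst h <;> exact ⟨by decide, by decide⟩
    simp only [pvB8Loop, if_pos hrange, List.foldl_cons]
    exact ih _ (fun c hm => h c (List.mem_cons_of_mem _ hm))

theorem any_invalid_false (l : List Char)
    (h : ∀ c ∈ l, c ∈ ("01234567" : String).toList) :
    l.any (fun ch => !(("01234567" : String).toList.contains ch)) = false := by
  simp only [List.any_eq_false, Bool.not_eq_true', Bool.not_eq_false]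
  intro c hc
  exact List.contains_iff_mem.mpr (h c hc)

-- ===== VERDICT (by name: the statement is the Claim_ definition above) =====
theorem decode_base8_int_spec : Claim_equal_decode_base8_int := by
  intro value _ hpre
  obtain ⟨hne, hpre⟩ := hpre
  simp only at hpre
  obtain ⟨hraw, hdigb⟩ := hpre
  simp only [List.all_eq_true] at hdigb
  have hdig : ∀ c ∈ (if PySem.Str.startswith value "-" then value.toList.drop 1 else value.toList),
      c ∈ ("01234567" : String).toList := fun c hc => List.contains_iff_mem.mp (hdigb c hc)
  unfold Spec_decode_base8_int decode_base8_int decode_base8_int_alt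
  simp only [if_neg hne]
  set sign : Int := if PySem.Str.startswith value "-" then -1 else 1 with hsign
  have hsame : (if sign < 0 then value.toList.drop 1 else value.toList) =
      (if PySem.Str.startswith value "-" then value.toList.drop 1 else value.toList) := by
    by_cases h : PySem.Str.startswith value "-"
    · rw [if_pos h, hsign, if_pos h]; norm_num
    · rw [if_neg h, hsign, if_neg h]; norm_num
  rw [hsame]
  set raw : List Char := if PySem.Str.startswith value "-" then value.toList.drop 1 else value.toList
  rw [if_neg hraw, if_neg hraw, any_invalid_false raw hdig, pvB8Loop_of_valid raw 0 hdig]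
  simp
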